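-- pv_equiv track=rewrite | github.com/qontinui/qontinui-devtools | python/qontinui_devtools/brobot_migration/mocks/qontinui_mock_generator.py | _map_setup_behavior
-- ===== SOURCE A (Python) =====
-- def _map_setup_behavior(setup_code: str) -> str:
--     """Map Brobot setup code to Qontinui equivalent."""
--     # Replace common Brobot patterns with Qontinui patterns
--     qontinui_setup = setup_code
--
--     # Replace method calls
--     replacements = {
--         ".when(": ".configure_mock(",
--         ".thenReturn(": ".return_value = ",
--         ".mock(": "Mock(spec=",
--         ".verify(": ".assert_called_with(",
--         "Mockito.": "",
--     }
--
--     for brobot_pattern, qontinui_pattern in replacements.items():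
--         qontinui_setup = qontinui_setup.replace(brobot_pattern, qontinui_pattern)
--
--     return qontinui_setup
-- ===== SOURCE B (Python) =====
-- def _map_setup_behavior(setup_code: str) -> str:
--     """Map Brobot setup code to Qontinui equivalent."""
--     replacements = [
--         (".when(", ".configure_mock("),
--         (".thenReturn(", ".return_value = "),
--         (".mock(", "Mock(spec="),
--         (".verify(", ".assert_called_with("),
--         ("Mockito.", ""),
--     ]
--
--     def apply(code, reps):
--         if not reps:
--             return code
--         old, new = reps[0]
--         return apply(new.join(code.split(old)), reps[1:])
--
--     return apply(setup_code, replacements)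
-- ===== Notes on version B (the rewrite author's own statement) =====
-- stated objective: alternative
-- what changed: The imperative loop of five sequential str.replace passes is replaced by a recursion over the pattern list where each substitution is performed by splitting on the pattern and joining the pieces with its replacement (new.join(code.split(old))).
import Mathlib
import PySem

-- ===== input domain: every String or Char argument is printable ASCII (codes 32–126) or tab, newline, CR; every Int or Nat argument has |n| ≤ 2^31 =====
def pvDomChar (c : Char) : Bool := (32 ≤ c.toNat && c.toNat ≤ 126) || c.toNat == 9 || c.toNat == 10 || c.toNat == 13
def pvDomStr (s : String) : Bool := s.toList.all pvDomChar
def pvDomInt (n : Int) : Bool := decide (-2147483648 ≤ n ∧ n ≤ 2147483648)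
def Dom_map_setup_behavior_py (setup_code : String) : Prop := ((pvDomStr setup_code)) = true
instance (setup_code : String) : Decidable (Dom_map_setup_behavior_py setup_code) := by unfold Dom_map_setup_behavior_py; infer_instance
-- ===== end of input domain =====

-- B replaces the five sequential str.replace passes by a recursion over the pattern list
-- in which each substitution is done by split/join (objective: alternative decomposition, same cost).


-- ===== PORT A =====
-- A: the replacements dict, iterated in insertion order, each pass a full str.replace.
def pyReplacements : List (String × String) :=
  [(".when(", ".configure_mock("),
   (".thenReturn(", ".return_value = "),
   (".mock(", "Mock(spec="),
   (".verify(", ".assert_called_with("),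
   ("Mockito.", "")]

def map_setup_behavior_py (setup_code : String) : String :=
  pyReplacements.foldl (fun q p => PySem.Str.replace q p.1 p.2) setup_code

-- ===== PORT B =====
-- B: recursion over the pattern list; each substitution is new.join(code.split(old)).
def altReplacements : List (String × String) :=
  [(".when(", ".configure_mock("),
   (".thenReturn(", ".return_value = "),
   (".mock(", "Mock(spec="),
   (".verify(", ".assert_called_with("),
   ("Mockito.", "")]

-- code.split(old) with old ≠ "" never raises, so the `.getD []` default is unreachable here.
def altApply (code : String) : List (String × String) → String
  | [] => code
  | (old, new) :: rest => altApply (PySem.Str.join new ((PySem.Str.split? code old).getD [])) rest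

def map_setup_behavior_py_alt (setup_code : String) : String :=
  altApply setup_code altReplacements

-- ===== PRECONDITION & SPEC =====
def Spec_map_setup_behavior_py (setup_code : String) (out : String) : Prop := out = map_setup_behavior_py_alt setup_code
instance (setup_code : String) (out : String) : Decidable (Spec_map_setup_behavior_py setup_code out) := by unfold Spec_map_setup_behavior_py; infer_instance

-- ===== CLAIM (what is proved, stated in full; the proofs are below) =====
def Claim_equal_map_setup_behavior_py : Prop := ∀ (setup_code : String), Dom_map_setup_behavior_py setup_code → Spec_map_setup_behavior_py setup_code (map_setup_behavior_py setup_code)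

-- ===== LEMMAS AND PROOFS =====

-- replace.go on an empty remainder returns the reversed accumulator, whatever the fuel.
theorem replace_go_nil (old new : List Char) (fuel : Nat) (acc : List Char) :
    PySem.Chars.replace.go old new fuel [] acc = acc.reverse := by
  cases fuel <;> simp [PySem.Chars.replace.go]

-- splitOn.go on an empty remainder, whatever the fuel.
theorem splitOn_go_nil (sep : List Char) (fuel : Nat) (cur : List Char) (acc : List (List Char)) :
    PySem.Chars.splitOn.go sep fuel [] cur acc = (cur.reverse :: acc).reverse := by
  cases fuel <;> simp [PySem.Chars.splitOn.go]

-- the accumulator of replace.go is a prefix of the output.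
theorem replace_go_acc (old new : List Char) (fuel : Nat) :
    ∀ (l acc : List Char),
      PySem.Chars.replace.go old new fuel l acc
        = acc.reverse ++ PySem.Chars.replace.go old new fuel l [] := by
  induction fuel with
  | zero => intro l acc; simp [PySem.Chars.replace.go]
  | succ n ih =>
    intro l acc
    cases l with
    | nil => simp [replace_go_nil]
    | cons c t =>
      simp only [PySem.Chars.replace.go]
      split_ifs with h
      · rw [ih (List.drop old.length (c :: t)) (new.reverse ++ acc),
            ih (List.drop old.length (c :: t)) (new.reverse ++ [])]
        simp
      · rw [ih t (c :: acc), ih t [c]]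
        simp

-- the accumulator of splitOn.go is a prefix of the output list.
theorem splitOn_go_acc (sep : List Char) (fuel : Nat) :
    ∀ (l cur : List Char) (acc : List (List Char)),
      PySem.Chars.splitOn.go sep fuel l cur acc
        = acc.reverse ++ PySem.Chars.splitOn.go sep fuel l cur [] := by
  induction fuel with
  | zero => intro l cur acc; simp [PySem.Chars.splitOn.go]
  | succ n ih =>
    intro l cur acc
    cases l with
    | nil => simp [splitOn_go_nil]
    | cons c t =>
      simp only [PySem.Chars.splitOn.go]
      split_ifs with h
      · rw [ih (List.drop sep.length (c :: t)) [] (cur.reverse :: acc),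
            ih (List.drop sep.length (c :: t)) [] [cur.reverse]]
        simp
      · rw [ih t (c :: cur) acc, ih t (c :: cur) []]

-- splitOn.go never returns the empty list.
theorem splitOn_go_ne_nil (sep : List Char) (fuel : Nat) :
    ∀ (l cur : List Char) (acc : List (List Char)),
      PySem.Chars.splitOn.go sep fuel l cur acc ≠ [] := by
  induction fuel with
  | zero => intro l cur acc; simp [PySem.Chars.splitOn.go]
  | succ n ih =>
    intro l cur acc
    cases l with
    | nil => simp [splitOn_go_nil]
    | cons c t =>
      simp only [PySem.Chars.splitOn.go]
      split_ifs with h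
      · exact ih _ _ _
      · exact ih _ _ _

-- core invariant: joining the pieces of splitOn.go with `new` replays replace.go.
theorem join_go (old new : List Char) (hold : old ≠ []) (fs : Nat) :
    ∀ (l cur : List Char) (fr : Nat), l.length < fs → l.length ≤ fr →
      PySem.Chars.join new (PySem.Chars.splitOn.go old fs l cur [])
        = cur.reverse ++ PySem.Chars.replace.go old new fr l [] := by
  induction fs with
  | zero => intro l cur fr h _; omega
  | succ n ih =>
    intro l cur fr hs hr
    cases l with
    | nil => simp [splitOn_go_nil, replace_go_nil, PySem.Chars.join, List.intercalate]
    | cons c t =>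
      have hlen : 1 ≤ old.length := by
        cases old with
        | nil => exact absurd rfl hold
        | cons _ _ => simp
      cases fr with
      | zero => simp at hr
      | succ m =>
        simp only [PySem.Chars.splitOn.go, PySem.Chars.replace.go]
        split_ifs with h
        · have hpl : old.length ≤ (c :: t).length := (List.isPrefixOf_iff_prefix.mp h).length_le
          rw [splitOn_go_acc old n _ [] [cur.reverse]]
          have hrest := splitOn_go_ne_nil old n (List.drop old.length (c :: t)) [] []
          have hlt : (List.drop old.length (c :: t)).length < n := by
            simp [List.length_drop]
            simp at hpl hs
            omega
          have hle : (List.drop old.length (c :: t)).length ≤ m := by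
            simp [List.length_drop]
            simp at hpl hr
            omega
          have hjoin : PySem.Chars.join new
              ([cur.reverse] ++ PySem.Chars.splitOn.go old n (List.drop old.length (c :: t)) [] [])
              = cur.reverse ++ new ++ PySem.Chars.join new (PySem.Chars.splitOn.go old n (List.drop old.length (c :: t)) [] []) := by
            cases hgo : PySem.Chars.splitOn.go old n (List.drop old.length (c :: t)) [] [] with
            | nil => exact absurd hgo hrest
            | cons p ps => simp [PySem.Chars.join, List.intercalate]
          simp only [List.reverse_singleton]
          rw [hjoin, ih (List.drop old.length (c :: t)) [] m hlt hle,
              replace_go_acc old new m _ (new.reverse ++ [])]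
          simp
        · have ht : t.length < n := by simp at hs; omega
          have ht' : t.length ≤ m := by simp at hr; omega
          rw [ih t (c :: cur) m ht ht', replace_go_acc old new m t [c]]
          simp

-- old ≠ "" ⇒ new.join(s.split(old)) = s.replace(old, new), at the Chars level …
theorem chars_join_splitOn (s old new : List Char) (hold : old ≠ []) :
    PySem.Chars.join new (PySem.Chars.splitOn s old) = PySem.Chars.replace s old new := by
  unfold PySem.Chars.splitOn PySem.Chars.replace
  rw [if_neg (by simp [List.isEmpty_iff, hold])]
  simpa using join_go old new hold (s.length + 1) s [] s.length (by omega) (le_refl _)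

-- … and at the String level, in the form B's port uses.
theorem str_join_split (s old new : String) (hold : old.toList ≠ []) :
    PySem.Str.join new ((PySem.Str.split? s old).getD []) = PySem.Str.replace s old new := by
  unfold PySem.Str.split? PySem.Str.replace PySem.Str.join PySem.Chars.split?
  rw [if_neg (by simp [List.isEmpty_iff, hold])]
  simp only [Option.map_some, Option.getD_some, List.map_map]
  rw [show (String.toList ∘ String.ofList) = id by funext l; simp]
  rw [List.map_id, chars_join_splitOn s.toList old.toList new.toList hold]

theorem ab_eq (s : String) : map_setup_behavior_py s = map_setup_behavior_py_alt s := by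
  unfold map_setup_behavior_py map_setup_behavior_py_alt pyReplacements altReplacements
  simp only [List.foldl, altApply]
  rw [str_join_split _ _ _ (by decide), str_join_split _ _ _ (by decide),
      str_join_split _ _ _ (by decide), str_join_split _ _ _ (by decide),
      str_join_split _ _ _ (by decide)]

-- ===== VERDICT (by name: the statement is the Claim_ definition above) =====
theorem map_setup_behavior_py_spec : Claim_equal_map_setup_behavior_py := by
  intro s _
  unfold Spec_map_setup_behavior_py
  exact ab_eq s
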